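-- pv_equiv track=rewrite | github.com/HamQadam/apply-srbiau | crawlers/daad_ingestor/cleaning.py | map_teaching_language
-- ===== SOURCE A (Python) =====
-- def map_teaching_language(langs: list[str] | None) -> str:
--     langs = langs or []
--     norm = {l.strip().lower() for l in langs}
--     if norm == {"english"}:
--         return "english"
--     if norm == {"german"}:
--         return "german"
--     if "english" in norm and "german" not in norm and len(norm) == 1:
--         return "english"
--     if "english" in norm and len(norm) >= 2:
--         # your schema is single-valued; pick english for search usefulness
--         return "english"
--     if "german" in norm and len(norm) >= 2:
--         return "german"
--     return "other"
-- ===== SOURCE B (Python) =====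
-- def map_teaching_language(langs: list[str] | None) -> str:
--     has_english = False
--     has_german = False
--     for l in (langs or []):
--         n = l.strip().lower()
--         has_english = has_english or n == "english"
--         has_german = has_german or n == "german"
--     if has_english:
--         return "english"
--     if has_german:
--         return "german"
--     return "other"
-- ===== Notes on version B (the rewrite author's own statement) =====
-- stated objective: simpler
-- what changed: Replaces building a normalized set and cascading set-equality/length checks with a single pass maintaining two boolean flags (english seen / german seen) and a three-way priority return.
import Mathlib
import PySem

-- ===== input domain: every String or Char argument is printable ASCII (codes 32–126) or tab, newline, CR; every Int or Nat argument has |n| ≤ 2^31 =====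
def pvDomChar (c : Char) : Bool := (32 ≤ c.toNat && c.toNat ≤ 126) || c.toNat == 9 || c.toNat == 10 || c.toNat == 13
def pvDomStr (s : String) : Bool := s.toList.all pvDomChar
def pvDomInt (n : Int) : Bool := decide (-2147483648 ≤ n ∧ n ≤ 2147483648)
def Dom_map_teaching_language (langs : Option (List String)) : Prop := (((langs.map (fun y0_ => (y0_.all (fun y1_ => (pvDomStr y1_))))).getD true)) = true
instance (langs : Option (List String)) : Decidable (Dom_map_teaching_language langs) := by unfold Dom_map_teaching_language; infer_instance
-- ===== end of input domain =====

-- B replaces A's normalized set and its cascade of set-equality/length checks by a single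
-- pass with two boolean flags (simpler); return value only, no mutation in either program.

-- shared helper: Python's l.strip().lower()
def pvNorm (l : String) : String := PySem.Str.lower (PySem.Str.strip l)

-- ===== PORT A =====
def map_teaching_language (langs : Option (List String)) : String :=
  let langs' := langs.getD []
  let norm : PySem.Set String := PySem.Set.ofList (langs'.map pvNorm)
  if PySem.Set.equal norm (PySem.Set.ofList ["english"]) then "english"
  else if PySem.Set.equal norm (PySem.Set.ofList ["german"]) then "german"
  else if PySem.Set.contains norm "english" && !(PySem.Set.contains norm "german")
          && (norm.length == 1) then "english"
  else if PySem.Set.contains norm "english" && (2 ≤ norm.length) then "english"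
  else if PySem.Set.contains norm "german" && (2 ≤ norm.length) then "german"
  else "other"

-- ===== PORT B =====
def map_teaching_language_alt (langs : Option (List String)) : String :=
  let st := (langs.getD []).foldl
    (fun (p : Bool × Bool) l =>
      let n := pvNorm l
      (p.1 || n == "english", p.2 || n == "german")) (false, false)
  if st.1 then "english" else if st.2 then "german" else "other"

-- ===== PRECONDITION & SPEC =====
def Spec_map_teaching_language (langs : Option (List String)) (out : String) : Prop := out = map_teaching_language_alt langs
instance (langs : Option (List String)) (out : String) : Decidable (Spec_map_teaching_language langs out) := by unfold Spec_map_teaching_language; infer_instance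

-- ===== CLAIM (what is proved, stated in full; the proofs are below) =====
def Claim_equal_map_teaching_language : Prop := ∀ (langs : Option (List String)), Dom_map_teaching_language langs → Spec_map_teaching_language langs (map_teaching_language langs)

-- ===== LEMMAS AND PROOFS =====

-- B's flag loop computes 'seen english' / 'seen german' as `any` over the list
theorem pvFoldFlags (xs : List String) (a b : Bool) :
    xs.foldl (fun (p : Bool × Bool) l =>
      let n := pvNorm l
      (p.1 || n == "english", p.2 || n == "german")) (a, b)
    = (a || xs.any (fun l => pvNorm l == "english"),
       b || xs.any (fun l => pvNorm l == "german")) := by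
  induction xs generalizing a b with
  | nil => simp
  | cons x xs ih => simp [List.foldl_cons, ih, Bool.or_assoc]

-- a length-1 list containing x is [x]
theorem pvSingleton {x : String} {s : List String} (hx : x ∈ s) (hlen : s.length = 1) :
    s = [x] := by
  match s, hlen with
  | [y], _ => simp at hx; simp [hx]

-- A's cascade over any set s returns english/german/other by membership priority
theorem pvACases (s : PySem.Set String) :
    (if PySem.Set.equal s (PySem.Set.ofList ["english"]) then "english"
     else if PySem.Set.equal s (PySem.Set.ofList ["german"]) then "german"
     else if PySem.Set.contains s "english" && !(PySem.Set.contains s "german")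
             && (s.length == 1) then "english"
     else if PySem.Set.contains s "english" && decide (2 ≤ s.length) then "english"
     else if PySem.Set.contains s "german" && decide (2 ≤ s.length) then "german"
     else "other")
    = (if "english" ∈ s then "english" else if "german" ∈ s then "german" else "other") := by
  have heq1 : ∀ x : String, (PySem.Set.equal s (PySem.Set.ofList [x]) = true) ↔ (∀ y, y ∈ s ↔ y = x) := by
    intro x
    rw [PySem.Set.equal_iff]
    constructor
    · intro h y; rw [h y, PySem.Set.mem_ofList]; simp
    · intro h y; rw [h y, PySem.Set.mem_ofList]; simp
  by_cases he : "english" ∈ s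
  · rw [if_pos he]
    split_ifs with h1 h2 h3 h4 h5 <;> try rfl
    · -- equal {"german"} but english ∈ s: impossible
      exact absurd (((heq1 "german").mp h2 "english").mp he) (by simp)
    all_goals
      exfalso
      have hne1 : s.length ≠ 1 := fun hl =>
        h1 ((heq1 "english").mpr (by intro y; rw [pvSingleton he hl]; simp))
      have hpos : 0 < s.length := List.length_pos_of_mem he
      have h2le : 2 ≤ s.length := by omega
      simp [h2le] at h4
      exact h4 he
  · rw [if_neg he]
    have h1 : PySem.Set.equal s (PySem.Set.ofList ["english"]) = false := by
      rw [Bool.eq_false_iff]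
      exact fun h => he (((heq1 "english").mp h "english").mpr rfl)
    by_cases hg : "german" ∈ s
    · rw [if_pos hg]
      split_ifs with hA hB hC hD hE <;> try rfl
      · simp [h1] at hA
      · simp at hC; exact absurd hC.1.1 he
      · simp at hD; exact absurd hD.1 he
      · exfalso
        have hne1 : s.length ≠ 1 := fun hl =>
          hB ((heq1 "german").mpr (by intro y; rw [pvSingleton hg hl]; simp))
        have hpos : 0 < s.length := List.length_pos_of_mem hg
        have h2le : 2 ≤ s.length := by omega
        simp [hg, h2le] at hE
    · rw [if_neg hg]
      have h2 : PySem.Set.equal s (PySem.Set.ofList ["german"]) = false := by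
        rw [Bool.eq_false_iff]
        exact fun h => hg (((heq1 "german").mp h "german").mpr rfl)
      simp [h1, h2, he, hg]

theorem pvMemAny (ys : List String) (x : String) :
    ((ys.any fun l => pvNorm l == x) = true) ↔ x ∈ PySem.Set.ofList (ys.map pvNorm) := by
  rw [PySem.Set.mem_ofList, List.mem_map, List.any_eq_true]
  constructor
  · rintro ⟨a, ha, hna⟩; exact ⟨a, ha, by simpa using hna⟩
  · rintro ⟨a, ha, hna⟩; exact ⟨a, ha, by simp [hna]⟩

-- ===== VERDICT (by name: the statement is the Claim_ definition above) =====
theorem map_teaching_language_spec : Claim_equal_map_teaching_language := by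
  intro langs _
  unfold Spec_map_teaching_language map_teaching_language map_teaching_language_alt
  rw [pvFoldFlags]
  simp only [Bool.false_or]
  rw [pvACases]
  by_cases he : "english" ∈ PySem.Set.ofList ((langs.getD []).map pvNorm)
  · rw [if_pos he, if_pos ((pvMemAny _ _).mpr he)]
  · rw [if_neg he]
    have heB : ((langs.getD []).any fun l => pvNorm l == "english") = false := by
      rw [Bool.eq_false_iff]; exact fun h => he ((pvMemAny _ _).mp h)
    rw [heB]
    by_cases hg : "german" ∈ PySem.Set.ofList ((langs.getD []).map pvNorm)
    · rw [if_pos hg]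
      simp [(pvMemAny _ _).mpr hg]
    · rw [if_neg hg]
      have hgB : ((langs.getD []).any fun l => pvNorm l == "german") = false := by
        rw [Bool.eq_false_iff]; exact fun h => hg ((pvMemAny _ _).mp h)
      simp [hgB]
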